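-- pv_equiv track=rewrite | github.com/Minal-Arunashalam/propaganda-detector | data/data_prep.py | get_line_spans
-- ===== SOURCE A (Python) =====
-- def get_line_spans(article_text):
--     #split article into lines and compute the character spans for each line
--     #characters spans are (start character, end character) for each line
--     #return list of (line id, start char, end char, line text without newline)
--     #doing this so we can get sentence, label pairs
--
--     #split article into lines, keeping newlines
--     lines = article_text.splitlines(keepends=True)
--
--     spans = []
--     current_pos = 0
--     #go through each line and compute spans
--     for i, line in enumerate(lines):
--         start = current_pos
--         end = start + len(line) #include newline in end pos, but remove in the stored text (model doesnt need newlines)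
--         text_no_newline = line.rstrip("\n")
--         spans.append((i, start, end, text_no_newline))
--         current_pos = end
--
--     return spans
-- ===== SOURCE B (Python) =====
-- def _prefix_sums(nums):
--     out, total = [], 0
--     for n in nums:
--         total += n
--         out.append(total)
--     return out
--
--
-- def get_line_spans(article_text):
--     lines = article_text.splitlines(keepends=True)
--     ends = _prefix_sums(len(l) for l in lines)
--     starts = [0] + ends[:-1]
--     return [(i, s, e, line.rstrip("\n"))
--             for i, (line, s, e) in enumerate(zip(lines, starts, ends))]
-- ===== Notes on version B (the rewrite author's own statement) =====
-- stated objective: alternative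
-- what changed: B separates the work into two differently-shaped passes: a prefix-sum pass builds the table of line end offsets (starts = [0]+ends[:-1]), and a second comprehension zips lines with their start/end offsets to assemble the tuples, instead of A's single loop threading a current_pos accumulator through tuple construction.
import Mathlib
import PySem

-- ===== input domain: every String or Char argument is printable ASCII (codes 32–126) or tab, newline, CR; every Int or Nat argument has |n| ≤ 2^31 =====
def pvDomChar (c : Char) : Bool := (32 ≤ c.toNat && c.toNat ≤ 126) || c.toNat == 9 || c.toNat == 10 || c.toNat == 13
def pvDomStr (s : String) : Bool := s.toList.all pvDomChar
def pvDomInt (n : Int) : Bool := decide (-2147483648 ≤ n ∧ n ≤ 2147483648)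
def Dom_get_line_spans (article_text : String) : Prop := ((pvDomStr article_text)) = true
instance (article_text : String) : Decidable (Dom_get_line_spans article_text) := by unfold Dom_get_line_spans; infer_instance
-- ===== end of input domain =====

-- B assembles the spans in two passes (a prefix-sum offset table, then a zip/enumerate
-- comprehension) instead of A's single accumulator loop; same cost, different decomposition.

-- str.splitlines(keepends=True), ported by hand: exact on the Dom character set
-- (printable ASCII + tab + '\n' + '\r'), where the only line boundaries are '\n', '\r', '\r\n'.
-- Shared by both ports, as both Pythons call the same built-in.
def pvSplitKeepends : List Char → List Char → List (List Char)
  | [], [] => []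
  | [], acc => [acc.reverse]
  | '\n' :: rest, acc => (acc.reverse ++ ['\n']) :: pvSplitKeepends rest []
  | '\r' :: '\n' :: rest, acc => (acc.reverse ++ ['\r', '\n']) :: pvSplitKeepends rest []
  | '\r' :: rest, acc => (acc.reverse ++ ['\r']) :: pvSplitKeepends rest []
  | c :: rest, acc => pvSplitKeepends rest (c :: acc)

-- line.rstrip("\n"), ported by hand (exact): drop trailing '\n' characters.
def pvRstripNl (cs : List Char) : List Char := (cs.reverse.dropWhile (· == '\n')).reverse

-- ===== PORT A =====
def get_line_spans (article_text : String) : List (Int × Int × Int × String) :=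
  let lines := pvSplitKeepends article_text.toList []
  (lines.foldl
    (fun (st : List (Int × Int × Int × String) × Int × Int) line =>
      let start := st.2.2
      let e := start + (line.length : Int)
      let text_no_newline := pvRstripNl line
      (st.1 ++ [(st.2.1, start, e, String.ofList text_no_newline)], st.2.1 + 1, e))
    ([], 0, 0)).1

-- ===== PORT B =====
def pvPrefixSumsAux (total : Int) : List Int → List Int
  | [] => []
  | n :: ns => (total + n) :: pvPrefixSumsAux (total + n) ns

def pvPrefixSums (ns : List Int) : List Int := pvPrefixSumsAux 0 ns

def get_line_spans_alt (article_text : String) : List (Int × Int × Int × String) :=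
  let lines := pvSplitKeepends article_text.toList []
  let ends := pvPrefixSums (lines.map (fun l => (l.length : Int)))
  let starts := (0 : Int) :: PySem.List.slice ends none (some (-1))
  (PySem.List.enumerate (lines.zip (starts.zip ends)) 0).map
    (fun p => (p.1, p.2.2.1, p.2.2.2, String.ofList (pvRstripNl p.2.1)))

-- ===== PRECONDITION & SPEC =====
def Spec_get_line_spans (article_text : String) (out : List (Int × Int × Int × String)) : Prop := out = get_line_spans_alt article_text
instance (article_text : String) (out : List (Int × Int × Int × String)) : Decidable (Spec_get_line_spans article_text out) := by unfold Spec_get_line_spans; infer_instance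

-- ===== CLAIM (what is proved, stated in full; the proofs are below) =====
def Claim_equal_get_line_spans : Prop := ∀ (article_text : String), Dom_get_line_spans article_text → Spec_get_line_spans article_text (get_line_spans article_text)

-- ===== LEMMAS AND PROOFS =====

-- Common characterisation of both results on a list of lines.
def pvBuild (i pos : Int) : List (List Char) → List (Int × Int × Int × String)
  | [] => []
  | l :: ls =>
      (i, pos, pos + (l.length : Int), String.ofList (pvRstripNl l)) ::
        pvBuild (i + 1) (pos + (l.length : Int)) ls

theorem pvFoldA_eq_build (lines : List (List Char))
    (spans : List (Int × Int × Int × String)) (i pos : Int) :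
    (lines.foldl
      (fun (st : List (Int × Int × Int × String) × Int × Int) line =>
        let start := st.2.2
        let e := start + (line.length : Int)
        let text_no_newline := pvRstripNl line
        (st.1 ++ [(st.2.1, start, e, String.ofList text_no_newline)], st.2.1 + 1, e))
      (spans, i, pos)).1 = spans ++ pvBuild i pos lines := by
  induction lines generalizing spans i pos with
  | nil => simp [pvBuild]
  | cons l ls ih => simp [List.foldl, pvBuild, ih]

theorem pvAssembleB_eq_build (lines : List (List Char)) (i pos : Int) :
    (PySem.List.enumerate
      (lines.zip
        ((pos :: (pvPrefixSumsAux pos (lines.map (fun l => (l.length : Int)))).dropLast).zip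
          (pvPrefixSumsAux pos (lines.map (fun l => (l.length : Int)))))) i).map
      (fun p => (p.1, p.2.2.1, p.2.2.2, String.ofList (pvRstripNl p.2.1)))
      = pvBuild i pos lines := by
  induction lines generalizing i pos with
  | nil => simp [pvPrefixSumsAux, pvBuild, PySem.List.enumerate_nil]
  | cons l ls ih =>
    cases ls with
    | nil =>
        simp [pvPrefixSumsAux, pvBuild, PySem.List.enumerate_cons,
          PySem.List.enumerate_nil]
    | cons l' ls' =>
        have h := ih (i + 1) (pos + (l.length : Int))
        simp only [List.map_cons, pvPrefixSumsAux, List.dropLast_cons₂,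
          List.zip_cons_cons, PySem.List.enumerate_cons, List.map_cons, pvBuild] at h ⊢
        rw [h]

-- ===== VERDICT (by name: the statement is the Claim_ definition above) =====
theorem get_line_spans_spec : Claim_equal_get_line_spans := by
  intro article_text _
  unfold Spec_get_line_spans get_line_spans get_line_spans_alt pvPrefixSums
  simp only []
  rw [PySem.List.slice_to_neg_one, pvFoldA_eq_build, pvAssembleB_eq_build]
  simp
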